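-- pv_equiv track=rewrite | github.com/braulio-cognitiva-ai/azure-builder | backend/app/services/resource_tracker.py | _detect_drift
-- ===== SOURCE A (Python) =====
-- from typing import List, Dict, Optional, Any
--
-- def _detect_drift(
--
--     expected: Optional[Dict[str, Any]],
--     actual: Optional[Dict[str, Any]]
-- ) -> bool:
--     """Detect if configuration has drifted.
--
--     Args:
--         expected: Expected configuration
--         actual: Actual configuration
--
--     Returns:
--         True if drift detected
--     """
--     if not expected or not actual:
--         return False
--
--     # Compare important properties
--     # This is a simplified comparison - in production you'd want more sophisticated logic
--     expected_props = expected.get("properties", {})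
--     actual_props = actual.get("properties", {})
--
--     # Check for differences in key properties
--     # (Ignore certain fields that naturally change, like provisioningState)
--     ignore_keys = {"provisioningState", "createdTime", "changedTime"}
--
--     for key in expected_props:
--         if key in ignore_keys:
--             continue
--
--         if key not in actual_props:
--             return True  # Property removed
--
--         if expected_props[key] != actual_props[key]:
--             return True  # Property changed
--
--     # Check for new properties
--     for key in actual_props:
--         if key in ignore_keys:
--             continue
--
--         if key not in expected_props:
--             return True  # New property added
--
--     return False
-- ===== SOURCE B (Python) =====
-- from typing import Dict, Optional, Any
--
-- def _detect_drift(
--     expected: Optional[Dict[str, Any]],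
--     actual: Optional[Dict[str, Any]]
-- ) -> bool:
--     if not expected or not actual:
--         return False
--     ignore_keys = {"provisioningState", "createdTime", "changedTime"}
--     e = {k: v for k, v in expected.get("properties", {}).items() if k not in ignore_keys}
--     a = {k: v for k, v in actual.get("properties", {}).items() if k not in ignore_keys}
--     return e != a
-- ===== Notes on version B (the rewrite author's own statement) =====
-- stated objective: simpler
-- what changed: Replaces A's two guarded scanning loops with early returns by materializing both ignore-filtered property dicts once and returning a single whole-dict inequality comparison.
import Mathlib
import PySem

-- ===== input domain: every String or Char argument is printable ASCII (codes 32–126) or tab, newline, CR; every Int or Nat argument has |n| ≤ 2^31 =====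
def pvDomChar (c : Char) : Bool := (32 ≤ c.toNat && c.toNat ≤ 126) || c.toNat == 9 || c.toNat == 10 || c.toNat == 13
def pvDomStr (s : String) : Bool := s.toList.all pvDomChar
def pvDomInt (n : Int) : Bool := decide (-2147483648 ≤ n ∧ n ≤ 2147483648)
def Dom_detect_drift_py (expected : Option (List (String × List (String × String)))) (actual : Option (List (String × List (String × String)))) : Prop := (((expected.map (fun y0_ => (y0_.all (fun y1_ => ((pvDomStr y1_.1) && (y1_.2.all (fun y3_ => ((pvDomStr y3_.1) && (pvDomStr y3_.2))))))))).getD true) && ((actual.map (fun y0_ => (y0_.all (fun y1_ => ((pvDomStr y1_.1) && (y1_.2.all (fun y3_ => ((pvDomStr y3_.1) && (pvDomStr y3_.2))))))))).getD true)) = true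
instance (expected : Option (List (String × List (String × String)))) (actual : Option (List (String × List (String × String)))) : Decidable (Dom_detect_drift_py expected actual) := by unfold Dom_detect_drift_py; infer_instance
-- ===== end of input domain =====

-- B replaces A's two guarded scanning loops by materializing both ignore-filtered property
-- dicts once and returning a single whole-dict inequality (objective: simpler).

-- ===== PORT A =====
-- ignore_keys = {"provisioningState", "createdTime", "changedTime"} (a 3-element literal set)
def pvIgnoreKeys : List String := ["provisioningState", "createdTime", "changedTime"]

def detect_drift_py (expected : Option (List (String × List (String × String)))) (actual : Option (List (String × List (String × String)))) : Bool :=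
  match expected, actual with
  | some e, some a =>
    -- 'if not expected or not actual: return False' (None handled by the outer match)
    if e.isEmpty || a.isEmpty then false
    else
      let expected_props := PySem.Dict.ofList ((PySem.Dict.ofList e).getD "properties" [])
      let actual_props := PySem.Dict.ofList ((PySem.Dict.ofList a).getD "properties" [])
      -- 'for key in expected_props: … return True' : a loop that only early-returns True is an any-scan
      if expected_props.keys.any (fun key =>
           !(pvIgnoreKeys.contains key) &&
           (!(actual_props.contains key) ||
            decide (expected_props.get? key ≠ actual_props.get? key))) then true
      else
        -- 'for key in actual_props: … return True'
        actual_props.keys.any (fun key =>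
          !(pvIgnoreKeys.contains key) && !(expected_props.contains key))
  | _, _ => false

-- ===== PORT B =====
-- Python's '==' on dicts, exact for dicts (unique keys): same size and every item of d found in d'.
def pyDictEq (d d' : PySem.Dict String String) : Bool :=
  (d.size == d'.size) && d.items.all (fun p => d'.get? p.1 == some p.2)

def pvIgnoreKeysB : List String := ["provisioningState", "createdTime", "changedTime"]

def detect_drift_py_alt (expected : Option (List (String × List (String × String)))) (actual : Option (List (String × List (String × String)))) : Bool :=
  match expected with
  | none => false
  | some e =>
    match actual with
    | none => false
    | some a =>
      if e.isEmpty || a.isEmpty then false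
      else
        let eP := PySem.Dict.ofList ((PySem.Dict.ofList e).getD "properties" [])
        let aP := PySem.Dict.ofList ((PySem.Dict.ofList a).getD "properties" [])
        -- '{k: v for k, v in ….items() if k not in ignore_keys}'
        let eF := PySem.Dict.mk (eP.items.filter (fun p => !(pvIgnoreKeysB.contains p.1)))
        let aF := PySem.Dict.mk (aP.items.filter (fun p => !(pvIgnoreKeysB.contains p.1)))
        !(pyDictEq eF aF)

-- ===== PRECONDITION & SPEC =====
def Spec_detect_drift_py (expected : Option (List (String × List (String × String)))) (actual : Option (List (String × List (String × String)))) (out : Bool) : Prop := out = detect_drift_py_alt expected actual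
instance (expected : Option (List (String × List (String × String)))) (actual : Option (List (String × List (String × String)))) (out : Bool) : Decidable (Spec_detect_drift_py expected actual out) := by unfold Spec_detect_drift_py; infer_instance

-- ===== CLAIM (what is proved, stated in full; the proofs are below) =====
def Claim_equal_detect_drift_py : Prop := ∀ (expected : Option (List (String × List (String × String)))) (actual : Option (List (String × List (String × String)))), Dom_detect_drift_py expected actual → Spec_detect_drift_py expected actual (detect_drift_py expected actual)

-- ===== LEMMAS AND PROOFS =====

theorem pv_size_eq_keys_length (d : PySem.Dict String String) : d.size = d.keys.length := by
  simp [PySem.Dict.size, PySem.Dict.keys]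

theorem pv_get?_mk_filter (q : String → Bool) (l : List (String × String)) (k : String) :
    (PySem.Dict.mk (l.filter (fun p => q p.1))).get? k =
      if q k then (PySem.Dict.mk l).get? k else none := by
  induction l with
  | nil => simp [PySem.Dict.get?]
  | cons a l ih =>
    obtain ⟨ak, av⟩ := a
    rw [List.filter_cons]
    by_cases hq : q (ak, av).1
    · rw [if_pos hq]
      rw [PySem.Dict.get?_mk_cons, PySem.Dict.get?_mk_cons]
      by_cases hk : ak = k
      · subst hk
        simp at hq
        simp [hq]
      · simp only [beq_iff_eq, hk, if_false]
        exact ih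
    · rw [if_neg hq]
      rw [PySem.Dict.get?_mk_cons, ih]
      by_cases hk : ak = k
      · subst hk
        simp only at hq
        simp [Bool.not_eq_true] at hq
        simp [hq]
      · simp [hk]

theorem pv_mem_keys_iff_get? (d : PySem.Dict String String) (k : String) :
    k ∈ d.keys ↔ d.get? k ≠ none := by
  constructor
  · intro h hn
    exact ((PySem.Dict.get?_eq_none_iff_not_mem_keys _ _).mp hn) h
  · intro h
    by_contra hn
    exact h ((PySem.Dict.get?_eq_none_iff_not_mem_keys _ _).mpr hn)

theorem pv_map_fst_filter (q : String → Bool) (l : List (String × String)) :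
    (l.filter (fun p => q p.1)).map (fun x => x.1) = (l.map (fun x => x.1)).filter q := by
  induction l with
  | nil => rfl
  | cons a l ih => by_cases h : q a.1 <;> simp [List.filter_cons, h, ih]

theorem pv_pyDictEq_iff (d d' : PySem.Dict String String)
    (hd : d.keys.Nodup) (hd' : d'.keys.Nodup) :
    pyDictEq d d' = true ↔ ∀ k, d.get? k = d'.get? k := by
  unfold pyDictEq
  rw [Bool.and_eq_true, beq_iff_eq, List.all_eq_true]
  constructor
  · rintro ⟨hsz, hall⟩ k
    cases hmem : d.get? k with
    | some v =>
      have hitem : (k, v) ∈ d.items := PySem.Dict.mem_items_of_get?_eq_some _ hmem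
      have h2 := hall _ hitem
      rw [beq_iff_eq] at h2
      exact h2.symm
    | none =>
      have hsub : d.keys ⊆ d'.keys := by
        intro x hx
        rcases hg : d.get? x with _ | v
        · exact absurd hg (by simpa using (pv_mem_keys_iff_get? d x).mp hx)
        · have h3 := hall _ (PySem.Dict.mem_items_of_get?_eq_some _ hg)
          rw [beq_iff_eq] at h3
          exact (pv_mem_keys_iff_get? d' x).mpr (by simp [h3])
      have hlen : d'.keys.length ≤ d.keys.length := by
        rw [← pv_size_eq_keys_length, ← pv_size_eq_keys_length, hsz]
      have hperm : d.keys.Perm d'.keys :=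
        (List.subperm_of_subset hd hsub).perm_of_length_le hlen
      have hk' : k ∉ d'.keys := by
        intro hmem'
        have hkd : k ∈ d.keys := hperm.mem_iff.mpr hmem'
        exact ((pv_mem_keys_iff_get? d k).mp hkd) hmem
      exact ((PySem.Dict.get?_eq_none_iff_not_mem_keys _ _).mpr hk').symm
  · intro h
    have hperm : d.keys.Perm d'.keys := by
      rw [List.perm_ext_iff_of_nodup hd hd']
      intro k
      rw [pv_mem_keys_iff_get?, pv_mem_keys_iff_get?, h k]
    refine ⟨by rw [pv_size_eq_keys_length, pv_size_eq_keys_length, hperm.length_eq], ?_⟩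
    rintro ⟨k, v⟩ hp
    have hg : d.get? k = some v := PySem.Dict.get?_of_mem_items _ hp hd
    rw [beq_iff_eq, ← h k]
    exact hg

-- the heart: A's two any-scans equal the negated filtered-dict equality
theorem pv_loops_eq_filter (eP aP : PySem.Dict String String)
    (he : eP.keys.Nodup) (ha : aP.keys.Nodup) :
    ((if eP.keys.any (fun key =>
         !(pvIgnoreKeys.contains key) &&
         (!(aP.contains key) || decide (eP.get? key ≠ aP.get? key))) then true
      else aP.keys.any (fun key =>
         !(pvIgnoreKeys.contains key) && !(eP.contains key)))) =
    !(pyDictEq (PySem.Dict.mk (eP.items.filter (fun p => !(pvIgnoreKeys.contains p.1))))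
               (PySem.Dict.mk (aP.items.filter (fun p => !(pvIgnoreKeys.contains p.1))))) := by
  have hkeysE : (PySem.Dict.mk (eP.items.filter (fun p => !(pvIgnoreKeys.contains p.1)))).keys
      = eP.keys.filter (fun k => !(pvIgnoreKeys.contains k)) := by
    rw [PySem.Dict.keys_mk]
    exact pv_map_fst_filter (fun k => !(pvIgnoreKeys.contains k)) eP.items
  have hkeysA : (PySem.Dict.mk (aP.items.filter (fun p => !(pvIgnoreKeys.contains p.1)))).keys
      = aP.keys.filter (fun k => !(pvIgnoreKeys.contains k)) := by
    rw [PySem.Dict.keys_mk]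
    exact pv_map_fst_filter (fun k => !(pvIgnoreKeys.contains k)) aP.items
  have heF : (PySem.Dict.mk (eP.items.filter (fun p => !(pvIgnoreKeys.contains p.1)))).keys.Nodup := by
    rw [hkeysE]; exact he.filter _
  have haF : (PySem.Dict.mk (aP.items.filter (fun p => !(pvIgnoreKeys.contains p.1)))).keys.Nodup := by
    rw [hkeysA]; exact ha.filter _
  have hgetE : ∀ k, (PySem.Dict.mk (eP.items.filter (fun p => !(pvIgnoreKeys.contains p.1)))).get? k
      = if !(pvIgnoreKeys.contains k) then eP.get? k else none := fun k =>
    pv_get?_mk_filter (fun k => !(pvIgnoreKeys.contains k)) eP.items k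
  have hgetA : ∀ k, (PySem.Dict.mk (aP.items.filter (fun p => !(pvIgnoreKeys.contains p.1)))).get? k
      = if !(pvIgnoreKeys.contains k) then aP.get? k else none := fun k =>
    pv_get?_mk_filter (fun k => !(pvIgnoreKeys.contains k)) aP.items k
  have hiff := pv_pyDictEq_iff _ _ heF haF
  cases hpq : pyDictEq (PySem.Dict.mk (eP.items.filter (fun p => !(pvIgnoreKeys.contains p.1))))
               (PySem.Dict.mk (aP.items.filter (fun p => !(pvIgnoreKeys.contains p.1)))) with
  | true =>
    -- the filtered dicts agree everywhere: neither loop can fire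
    have hall := hiff.mp hpq
    have h1 : eP.keys.any (fun key =>
         !(pvIgnoreKeys.contains key) &&
         (!(aP.contains key) || decide (eP.get? key ≠ aP.get? key))) = false := by
      rw [List.any_eq_false]
      intro k hk hcond
      rw [Bool.and_eq_true] at hcond
      obtain ⟨hnin, hbad⟩ := hcond
      have hagree := hall k
      rw [hgetE k, hgetA k, hnin, if_pos rfl] at hagree
      rw [Bool.or_eq_true] at hbad
      have hESome : eP.get? k ≠ none := (pv_mem_keys_iff_get? eP k).mp hk
      rcases hbad with hbad | hbad
      · rw [Bool.not_eq_true'] at hbad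
        have : aP.get? k = none := (PySem.Dict.get?_eq_none_iff_contains _ _).mpr hbad
        rw [this] at hagree
        exact hESome hagree
      · exact (of_decide_eq_true hbad) hagree
    have h2 : aP.keys.any (fun key =>
         !(pvIgnoreKeys.contains key) && !(eP.contains key)) = false := by
      rw [List.any_eq_false]
      intro k hk hcond
      rw [Bool.and_eq_true] at hcond
      obtain ⟨hnin, hbad⟩ := hcond
      have hagree := hall k
      rw [hgetE k, hgetA k, hnin, if_pos rfl] at hagree
      rw [Bool.not_eq_true'] at hbad
      have hE : eP.get? k = none := (PySem.Dict.get?_eq_none_iff_contains _ _).mpr hbad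
      rw [hE] at hagree
      exact ((pv_mem_keys_iff_get? aP k).mp hk) hagree.symm
    rw [h1, h2]
    rfl
  | false =>
    -- the filtered dicts differ at some key: one of the loops fires
    have hne : ¬ ∀ k, (PySem.Dict.mk (eP.items.filter (fun p => !(pvIgnoreKeys.contains p.1)))).get? k
        = (PySem.Dict.mk (aP.items.filter (fun p => !(pvIgnoreKeys.contains p.1)))).get? k := by
      intro hall
      rw [hiff.mpr hall] at hpq
      cases hpq
    obtain ⟨k, hkne⟩ := not_forall.mp hne
    rw [hgetE k, hgetA k] at hkne
    have hnin : pvIgnoreKeys.contains k = false := by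
      by_contra hc
      rw [Bool.not_eq_false] at hc
      rw [hc] at hkne
      exact hkne rfl
    rw [hnin] at hkne
    simp only [Bool.not_false, if_pos rfl] at hkne
    simp only [Bool.not_false]
    by_cases hc1 : eP.keys.any (fun key =>
         !(pvIgnoreKeys.contains key) &&
         (!(aP.contains key) || decide (eP.get? key ≠ aP.get? key))) = true
    · rw [hc1]; rfl
    · rw [Bool.not_eq_true] at hc1
      rw [hc1]
      simp only [Bool.false_eq_true, if_false]
      -- the first loop did not fire, so eP.get? k must be none and aP.get? k some
      rcases hgE : eP.get? k with _ | v
      · rcases hgA : aP.get? k with _ | w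
        · rw [hgE, hgA] at hkne; exact absurd rfl hkne
        · rw [List.any_eq_true]
          refine ⟨k, (pv_mem_keys_iff_get? aP k).mpr (by simp [hgA]), ?_⟩
          rw [Bool.and_eq_true, hnin]
          refine ⟨rfl, ?_⟩
          rw [Bool.not_eq_true', ← PySem.Dict.get?_eq_none_iff_contains]
          exact hgE
      · exfalso
        rw [List.any_eq_false] at hc1
        apply hc1 k ((pv_mem_keys_iff_get? eP k).mpr (by simp [hgE]))
        rw [Bool.and_eq_true, hnin]
        refine ⟨rfl, ?_⟩
        rw [Bool.or_eq_true]
        right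
        exact decide_eq_true hkne

-- ===== VERDICT (by name: the statement is the Claim_ definition above) =====
theorem detect_drift_py_spec : Claim_equal_detect_drift_py := by
  intro expected actual _
  unfold Spec_detect_drift_py
  cases expected with
  | none => cases actual <;> rfl
  | some e =>
    cases actual with
    | none => rfl
    | some a =>
      simp only [detect_drift_py, detect_drift_py_alt]
      by_cases hg : (e.isEmpty || a.isEmpty) = true
      · rw [if_pos hg, if_pos hg]
      · rw [if_neg hg, if_neg hg]
        exact pv_loops_eq_filter _ _
          (PySem.Dict.nodup_keys_ofList _) (PySem.Dict.nodup_keys_ofList _)
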